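-- pv_equiv track=rewrite | github.com/noortor/CS61A-Content | project/Cats/cats/typing.py | swap_diff
-- ===== SOURCE A (Python) =====
-- def swap_diff(start, goal, limit):
--     """A diff function for autocorrect that determines how many letters
--     in START need to be substituted to create GOAL, then adds the difference in
--     their lengths.
--     """
--     # BEGIN PROBLEM
--     if limit < 0:
--         return 0
--     elif not len(start) or not len(goal):
--         return max(len(start),len(goal))
--     elif start[0] == goal[0]:
--         return swap_diff(start[1:], goal[1:], limit)
--     else:
--         return 1 + swap_diff(start[1:], goal[1:], limit-1)
-- ===== SOURCE B (Python) =====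
-- def swap_diff(start, goal, limit):
--     if limit < 0:
--         return 0
--     m = sum(1 for a, b in zip(start, goal) if a != b)
--     if m > limit:
--         return limit + 1
--     return m + abs(len(start) - len(goal))
-- ===== Notes on version B (the rewrite author's own statement) =====
-- stated objective: faster
-- what changed: Replaces A's per-character short-circuiting recursion with one aggregate pass counting mismatches over zip(start, goal), then a closed-form decision: limit+1 if the count exceeds limit, else count plus the length difference.
import Mathlib
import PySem

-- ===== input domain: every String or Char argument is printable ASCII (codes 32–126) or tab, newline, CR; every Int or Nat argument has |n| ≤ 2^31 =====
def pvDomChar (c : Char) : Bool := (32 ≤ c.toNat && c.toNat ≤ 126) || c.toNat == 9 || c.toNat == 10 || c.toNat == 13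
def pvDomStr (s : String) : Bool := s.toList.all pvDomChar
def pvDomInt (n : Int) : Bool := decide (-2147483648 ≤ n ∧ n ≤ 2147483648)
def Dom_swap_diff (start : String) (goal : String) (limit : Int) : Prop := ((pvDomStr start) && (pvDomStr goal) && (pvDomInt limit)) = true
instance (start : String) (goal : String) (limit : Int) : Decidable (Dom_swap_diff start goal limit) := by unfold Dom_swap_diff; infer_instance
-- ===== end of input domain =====

-- B replaces A's per-character recursion by one mismatch-counting pass over the zipped prefix
-- and a closed-form decision; a timing run measured B faster (constant-factor: no recursion).


-- ===== PORT A =====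
-- literal transliteration of A's recursion on the two strings (as char lists;
-- on the empty-string branch max(len start, len goal) collapses to the other length)
def swapDiffRec : List Char → List Char → Int → Int
  | s, g, limit =>
    if limit < 0 then 0
    else
      match s, g with
      | [], g' => (g'.length : Int)        -- max(0, len goal)
      | s', [] => (s'.length : Int)        -- max(len start, 0)
      | a :: s', b :: g' =>
        if a = b then swapDiffRec s' g' limit
        else 1 + swapDiffRec s' g' (limit - 1)

def swap_diff (start : String) (goal : String) (limit : Int) : Int :=
  swapDiffRec start.toList goal.toList limit

-- ===== PORT B =====
def swap_diff_alt (start : String) (goal : String) (limit : Int) : Int :=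
  if limit < 0 then 0
  else
    let m : Int := (List.zip start.toList goal.toList).foldl
      (fun acc p => if p.1 ≠ p.2 then acc + 1 else acc) 0
    if m > limit then limit + 1
    else m + (((start.toList.length : Int) - (goal.toList.length : Int)).natAbs : Int)

-- ===== PRECONDITION & SPEC =====
def Spec_swap_diff (start : String) (goal : String) (limit : Int) (out : Int) : Prop := out = swap_diff_alt start goal limit
instance (start : String) (goal : String) (limit : Int) (out : Int) : Decidable (Spec_swap_diff start goal limit out) := by unfold Spec_swap_diff; infer_instance

-- ===== CLAIM (what is proved, stated in full; the proofs are below) =====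
def Claim_equal_swap_diff : Prop := ∀ (start : String) (goal : String) (limit : Int), Dom_swap_diff start goal limit → Spec_swap_diff start goal limit (swap_diff start goal limit)

-- ===== LEMMAS AND PROOFS =====

def pvCnt : List (Char × Char) → Int
  | [] => 0
  | x :: l => (if x.1 ≠ x.2 then 1 else 0) + pvCnt l

theorem pvFoldl_shift (l : List (Char × Char)) (c : Int) :
    l.foldl (fun acc p => if p.1 ≠ p.2 then acc + 1 else acc) c = c + pvCnt l := by
  induction l generalizing c with
  | nil => simp [pvCnt]
  | cons x xs ih =>
    simp only [List.foldl_cons, pvCnt]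
    rw [ih]
    split_ifs <;> ring

theorem pvCnt_nonneg (l : List (Char × Char)) : 0 ≤ pvCnt l := by
  induction l with
  | nil => simp [pvCnt]
  | cons x xs ih => simp only [pvCnt]; split_ifs <;> omega

theorem pvRec_nil (g : List Char) (limit : Int) :
    swapDiffRec [] g limit = if limit < 0 then 0 else (g.length : Int) := rfl

theorem pvRec_nil_right (a : Char) (s' : List Char) (limit : Int) :
    swapDiffRec (a :: s') [] limit = if limit < 0 then 0 else ((a :: s').length : Int) := rfl

theorem pvRec_cons (a b : Char) (s' g' : List Char) (limit : Int) :
    swapDiffRec (a :: s') (b :: g') limit =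
      if limit < 0 then 0
      else if a = b then swapDiffRec s' g' limit
      else 1 + swapDiffRec s' g' (limit - 1) := rfl

theorem pvRec_neg (s g : List Char) (limit : Int) (h : limit < 0) :
    swapDiffRec s g limit = 0 := by
  cases s with
  | nil => rw [pvRec_nil, if_pos h]
  | cons a s' =>
    cases g with
    | nil => rw [pvRec_nil_right, if_pos h]
    | cons b g' => rw [pvRec_cons, if_pos h]

theorem pvMain (s g : List Char) (limit : Int) (h : 0 ≤ limit) :
    swapDiffRec s g limit =
      if pvCnt (List.zip s g) > limit then limit + 1
      else pvCnt (List.zip s g) + (((s.length : Int) - (g.length : Int)).natAbs : Int) := by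
  induction s generalizing g limit with
  | nil =>
    rw [pvRec_nil, List.zip_nil_left]
    simp only [pvCnt, List.length_nil]
    rw [if_neg (by omega), if_neg (by omega)]
    simp only [Nat.cast_zero]
    omega
  | cons a s' ih =>
    cases g with
    | nil =>
      rw [pvRec_nil_right, List.zip_nil_right]
      simp only [pvCnt, List.length_cons, List.length_nil]
      rw [if_neg (by omega), if_neg (by omega)]
      simp only [Nat.cast_zero]
      omega
    | cons b g' =>
      have hnn := pvCnt_nonneg (List.zip s' g')
      rw [pvRec_cons, List.zip_cons_cons]
      simp only [pvCnt, List.length_cons]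
      have hlen : ((((s'.length : Nat) + 1 : Nat) : Int) - (((g'.length : Nat) + 1 : Nat) : Int)).natAbs
          = ((s'.length : Int) - (g'.length : Int)).natAbs := by push_cast; omega
      rw [if_neg (by omega)]
      by_cases hab : a = b
      · rw [if_pos hab, ih g' limit h]
        simp only [ne_eq, hab, not_true_eq_false, if_false]
        rw [hlen]
        split_ifs with h1 h2 h2 <;> omega
      · rw [if_neg hab]
        simp only [ne_eq, hab, not_false_eq_true, if_true]
        rw [hlen]
        by_cases hl : 0 ≤ limit - 1
        · rw [ih g' (limit - 1) hl]
          split_ifs with h1 h2 h2 <;> omega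
        · -- limit = 0: the inner call hits the limit < 0 branch
          have h0 : swapDiffRec s' g' (limit - 1) = 0 :=
            pvRec_neg s' g' (limit - 1) (by omega)
          rw [h0, if_pos (by omega)]
          omega

-- ===== VERDICT (by name: the statement is the Claim_ definition above) =====
theorem swap_diff_spec : Claim_equal_swap_diff := by
  intro start goal limit _
  simp only [Spec_swap_diff, swap_diff, swap_diff_alt]
  by_cases h : limit < 0
  · rw [if_pos h, pvRec_neg _ _ _ h]
  · rw [if_neg h, pvMain start.toList goal.toList limit (by omega), pvFoldl_shift]
    omega
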